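-- pv_equiv track=rewrite | github.com/sebastiengilbert73/ReinforcementLearning | environments/attributes.py | StateActionPairs
-- ===== SOURCE A (Python) =====
-- def StateActionPairs(episode):
--     # episode = [reward0, obs0, action1, reward1, obs1, action2, reward2, obs2, ..., obsN - 1]
--     if len(episode)%3 != 2:
--         raise ValueError("Episodic.StateActionPairs(): The length of the episode ({}) modulo 3 is not 2".format(len(episode)))
--     stateAction_pairs = []
--     number_of_actions = len(episode)//3
--     for stepNdx in range(number_of_actions):
--         stateNdx = 3 * stepNdx + 1
--         actionNdx = 3 * stepNdx + 2
--         stateAction_pairs.append((episode[stateNdx], episode[actionNdx]))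
--     return stateAction_pairs
-- ===== SOURCE B (Python) =====
-- def StateActionPairs(episode):
--     # episode = [reward0, obs0, action1, reward1, obs1, action2, ...]
--     if len(episode) % 3 != 2:
--         raise ValueError("Episodic.StateActionPairs(): The length of the episode ({}) modulo 3 is not 2".format(len(episode)))
--     it = iter(episode)
--     next(it)  # drop the leading reward
--     # consume (state, action, reward) triples; the trailing lone observation is truncated by zip
--     return [(state, action) for state, action, _reward in zip(it, it, it)]
-- ===== Notes on version B (the rewrite author's own statement) =====
-- stated objective: idiomatic
-- what changed: Replaces the index-arithmetic loop (range, 3*step+1/3*step+2 lookups) with an iterator pipeline: drop the leading reward, then zip the same iterator three times to consume (state, action, reward) triples, keeping (state, action); no indexing at all.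
import Mathlib
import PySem

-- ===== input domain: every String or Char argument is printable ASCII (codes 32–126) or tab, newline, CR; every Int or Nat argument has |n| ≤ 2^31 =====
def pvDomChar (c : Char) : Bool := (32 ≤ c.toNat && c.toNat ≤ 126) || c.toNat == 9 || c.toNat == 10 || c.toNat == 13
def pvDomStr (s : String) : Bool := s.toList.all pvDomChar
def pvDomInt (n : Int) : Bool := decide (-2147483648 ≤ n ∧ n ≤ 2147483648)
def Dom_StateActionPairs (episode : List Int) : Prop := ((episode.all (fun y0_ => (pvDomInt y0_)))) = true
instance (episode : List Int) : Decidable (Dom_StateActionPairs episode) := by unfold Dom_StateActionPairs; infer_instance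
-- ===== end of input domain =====

-- B replaces A's index-arithmetic loop by an iterator pipeline consuming (state, action, reward)
-- triples; equivalence is proved on episodes of length ≡ 2 (mod 3), where A does not raise.

-- ===== PORT A =====
-- literal port: range loop, 3*step+1 / 3*step+2 lookups (in range whenever Pre_ holds)
def StateActionPairs (episode : List Int) : List (Int × Int) :=
  let number_of_actions : Int := PySem.Int.floordiv (episode.length : Int) 3
  (PySem.List.pyRange 0 number_of_actions 1).foldl
    (fun acc stepNdx =>
      acc ++ [(((PySem.List.pyGet? episode (3 * stepNdx + 1)).getD 0),
               ((PySem.List.pyGet? episode (3 * stepNdx + 2)).getD 0))]) []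

-- ===== PORT B =====
-- the zip(it, it, it) pipeline: consume three elements per step, keep (state, action)
def tripleZipPairs : List Int → List (Int × Int)
  | state :: action :: _reward :: rest => (state, action) :: tripleZipPairs rest
  | _ => []

def StateActionPairs_alt (episode : List Int) : List (Int × Int) :=
  tripleZipPairs episode.tail

-- ===== PRECONDITION & SPEC =====
-- Python A raises ValueError unless len(episode) % 3 == 2
def Pre_StateActionPairs (episode : List Int) : Prop := episode.length % 3 = 2
instance (episode : List Int) : Decidable (Pre_StateActionPairs episode) := by
  unfold Pre_StateActionPairs; infer_instance

def pvWitness_StateActionPairs : List Int := [0, 7, 1, 2, 8]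

def Spec_StateActionPairs (episode : List Int) (out : List (Int × Int)) : Prop := out = StateActionPairs_alt episode
instance (episode : List Int) (out : List (Int × Int)) : Decidable (Spec_StateActionPairs episode out) := by unfold Spec_StateActionPairs; infer_instance

-- ===== CLAIM (what is proved, stated in full; the proofs are below) =====
def Claim_equal_StateActionPairs : Prop := ∀ (episode : List Int), Dom_StateActionPairs episode → Pre_StateActionPairs episode → Spec_StateActionPairs episode (StateActionPairs episode)

-- ===== LEMMAS AND PROOFS =====

-- A's loop, written as a map over the step indices, equals B's triple-consuming recursion.
theorem range_map_eq_tripleZip (k : ℕ) : ∀ (episode : List Int), episode.length = 3 * k + 2 →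
    (List.range k).map (fun j =>
        ((episode[3 * j + 1]?).getD 0, (episode[3 * j + 2]?).getD 0))
      = tripleZipPairs episode.tail := by
  induction k with
  | zero =>
    intro episode h
    match episode, h with
    | [r, s], _ => simp [tripleZipPairs]
  | succ k ih =>
    intro episode h
    match episode, h with
    | r :: s :: a :: w :: rest, h =>
      have hrest : (w :: rest).length = 3 * k + 2 := by
        simp at h ⊢; omega
      have ihr := ih (w :: rest) hrest
      simp only [List.tail_cons] at ihr ⊢
      show _ = tripleZipPairs (s :: a :: w :: rest)
      rw [show tripleZipPairs (s :: a :: w :: rest) = (s, a) :: tripleZipPairs rest from rfl]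
      simp only [List.range_succ_eq_map, List.map_cons, List.map_map]
      refine congrArg₂ _ (by simp) ?_
      rw [← ihr]
      apply List.map_congr_left
      intro j _
      have h1 : 3 * (j + 1) + 1 = ((3 * j + 1) + 1) + 1 + 1 := by omega
      have h2 : 3 * (j + 1) + 2 = ((3 * j + 2) + 1) + 1 + 1 := by omega
      simp only [Function.comp, Nat.succ_eq_add_one, h1, h2, List.getElem?_cons_succ]

-- ===== VERDICT =====
theorem StateActionPairs_spec : Claim_equal_StateActionPairs := by
  intro episode _ hpre
  unfold Spec_StateActionPairs StateActionPairs StateActionPairs_alt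
  obtain ⟨k, hk⟩ : ∃ k : ℕ, episode.length = 3 * k + 2 :=
    ⟨episode.length / 3, by have := hpre; unfold Pre_StateActionPairs at this; omega⟩
  have hfd : PySem.Int.floordiv (episode.length : Int) 3 = (k : Int) := by
    rw [show ((episode.length : Int)) = ((episode.length : ℕ) : Int) from rfl]
    rw [show (3 : Int) = ((3 : ℕ) : Int) from rfl, PySem.Int.floordiv_natCast]
    have h3 : episode.length / 3 = k := by omega
    rw [h3]
  simp only [hfd, PySem.List.foldl_append_singleton_eq_map, List.nil_append,
    PySem.List.pyRange_one]
  rw [← range_map_eq_tripleZip k episode hk]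
  norm_num
  intro j _
  have g1 : (3 * ((j:Int)) + 1) = ((3 * j + 1 : ℕ) : Int) := by push_cast; ring
  have g2 : (3 * ((j:Int)) + 2) = ((3 * j + 2 : ℕ) : Int) := by push_cast; ring
  rw [g1, g2, PySem.List.pyGet?_natCast, PySem.List.pyGet?_natCast]
  exact ⟨rfl, rfl⟩
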